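-- pv_equiv track=rewrite | github.com/manwar/perlweeklychallenge-club | challenge-084/roger-bell-west/python/ch-2.py | fs
-- ===== SOURCE A (Python) =====
-- def fs(s):
--     t=0
--     maxx=len(s)-1
--     maxy=len(s[0])-1
--     for x in range(0,maxx):
--         for y in range(0,maxy):
--             if (s[x][y] == 1):
--                 for d in range(1,min(maxx-x,maxy-y)+1):
--                     if (s[x+d][y] == 1 and
--                         s[x][y+d] == 1 and
--                         s[x+d][y+d] == 1):
--                             t += 1
--     return t
-- ===== SOURCE B (Python) =====
-- def fs(s):
--     # grid width is taken from row 0, exactly as A's bounds are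
--     m = len(s[0])
--     cols = [[c for c, v in enumerate(row[:m]) if v == 1] for row in s]
--     n = len(cols)
--     t = 0
--     for i in range(n):
--         for j in range(i + 1, n):
--             g = j - i
--             inter = [c for c in cols[i] if c in cols[j]]
--             t += sum(1 for c in inter if c + g in inter)
--     return t
-- ===== Notes on version B (the rewrite author's own statement) =====
-- stated objective: alternative
-- what changed: B replaces A's per-cell scan with growing-diagonal inner loop by a row-pair decomposition: it precomputes per-row lists of 1-columns (width taken from row 0, as A's bounds are) and, for each pair of rows with gap g, counts columns c in their intersection with c+g also in the intersection.
-- outside the precondition, e.g. on fs([[1, 2], [3]]): A returns 0, B returns 0; on fs([[1, 1, 1], [1, 1]]): A raises IndexError, B returns 1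
import Mathlib
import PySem

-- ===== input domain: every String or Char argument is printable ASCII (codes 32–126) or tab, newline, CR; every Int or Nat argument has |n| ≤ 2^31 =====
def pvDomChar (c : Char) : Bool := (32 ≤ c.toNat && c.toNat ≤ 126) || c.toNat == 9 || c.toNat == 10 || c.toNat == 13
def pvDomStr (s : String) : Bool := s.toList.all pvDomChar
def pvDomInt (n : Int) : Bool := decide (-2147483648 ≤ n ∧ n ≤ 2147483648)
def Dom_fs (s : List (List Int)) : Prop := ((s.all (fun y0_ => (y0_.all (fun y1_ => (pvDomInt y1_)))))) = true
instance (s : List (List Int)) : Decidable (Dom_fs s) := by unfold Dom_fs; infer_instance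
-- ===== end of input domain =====

-- B is a different decomposition: per-row lists of 1-columns (width taken from row 0, as A's
-- bounds are) intersected over row pairs, instead of A's per-cell scan with a growing-diagonal
-- inner loop (similar cost: "alternative").

-- ===== PORT A =====
-- s[i][j] via pyGetD (every index A's loops reach is in range under Pre_fs)
def g2 (s : List (List Int)) (i j : Int) : Int :=
  PySem.List.pyGetD (PySem.List.pyGetD s i []) j 0

def fs (s : List (List Int)) : Int :=
  let maxx : Int := (s.length : Int) - 1
  let maxy : Int := (((PySem.List.pyGet? s 0).getD []).length : Int) - 1
  (PySem.List.pyRange 0 maxx 1).foldl (fun t x =>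
    (PySem.List.pyRange 0 maxy 1).foldl (fun t y =>
      if g2 s x y == 1 then
        (PySem.List.pyRange 1 (min (maxx - x) (maxy - y) + 1) 1).foldl (fun t d =>
          if g2 s (x + d) y == 1 && (g2 s x (y + d) == 1 && g2 s (x + d) (y + d) == 1) then t + 1
          else t) t
      else t) t) 0

-- ===== PORT B =====
-- [c for c, v in enumerate(row[:m]) if v == 1]
def colsOf (row : List Int) : List Int :=
  (PySem.List.enumerate row 0).foldl (fun acc p => if p.2 == 1 then acc ++ [p.1] else acc) []

def fs_alt (s : List (List Int)) : Int :=
  let m : Int := (((PySem.List.pyGet? s 0).getD []).length : Int)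
  let cols : List (List Int) := s.map (fun row => colsOf (PySem.List.slice row none (some m)))
  let n : Int := (cols.length : Int)
  (PySem.List.pyRange 0 n 1).foldl (fun t i =>
    (PySem.List.pyRange (i + 1) n 1).foldl (fun t j =>
      let g : Int := j - i
      let inter : List Int :=
        (PySem.List.pyGetD cols i []).filter (fun c => c ∈ PySem.List.pyGetD cols j [])
      t + inter.foldl (fun a c => if (c + g) ∈ inter then a + 1 else a) 0) t) 0

-- ===== PRECONDITION & SPEC =====
-- Pre_fs admits closed-form classes on which A provably returns (a single row, width ≤ 1, every
-- row at least as wide as row 0, or a 1-free grid whose non-final rows have width ≥ width(row 0)-1);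
-- outside it A raises IndexError on a short row except for some ragged grids containing 1s where
-- every access A happens to reach is in range — there A returns and B returns the same value, but
-- that no-crash condition is not closed-form, so those inputs are excluded too.
def Pre_fs (s : List (List Int)) : Prop :=
  s ≠ [] ∧ (s.length = 1 ∨ s.headI.length ≤ 1 ∨
    (∀ r ∈ s, s.headI.length ≤ r.length) ∨
    ((∀ r ∈ s.dropLast, s.headI.length ≤ r.length + 1) ∧ (∀ r ∈ s, (1 : Int) ∉ r)))
instance (s : List (List Int)) : Decidable (Pre_fs s) := by unfold Pre_fs; infer_instance
def pvWitness_fs : List (List Int) := [[1, 1], [1, 1]]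

def Spec_fs (s : List (List Int)) (out : Int) : Prop := out = fs_alt s
instance (s : List (List Int)) (out : Int) : Decidable (Spec_fs s out) := by unfold Spec_fs; infer_instance

-- ===== CLAIM (what is proved, stated in full; the proofs are below) =====
def Claim_equal_fs : Prop := ∀ (s : List (List Int)), Dom_fs s → Pre_fs s → Spec_fs s (fs s)

-- ===== LEMMAS AND PROOFS =====

-- the bounded four-corner indicator both programs count
def ind (s : List (List Int)) (x y d : Int) : Int :=
  if x + d < (s.length : Int) ∧ y + d < (s.headI.length : Int) ∧
      g2 s x y = 1 ∧ g2 s (x + d) y = 1 ∧ g2 s x (y + d) = 1 ∧ g2 s (x + d) (y + d) = 1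
    then 1 else 0

-- canonical full-rectangle triple sum
def S (s : List (List Int)) : Int :=
  ∑ x ∈ Finset.range s.length, ∑ y ∈ Finset.range s.headI.length,
    ∑ d ∈ Finset.range s.length, ind s (x : Int) (y : Int) ((d : Int) + 1)

theorem sum_map_range (n : Nat) (f : Nat → Int) :
    ((List.range n).map f).sum = ∑ k ∈ Finset.range n, f k := rfl

theorem foldl_body_add {α : Type} (l : List α) (f : Int → α → Int) (F : α → Int)
    (hf : ∀ t x, x ∈ l → f t x = t + F x) (init : Int) :
    l.foldl f init = init + (l.map F).sum := by
  induction l generalizing init with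
  | nil => simp
  | cons a l ih =>
    simp only [List.foldl_cons, List.map_cons, List.sum_cons]
    rw [hf init a (by simp), ih (fun t x hx => hf t x (by simp [hx]))]
    ring

theorem sum_map_pyRange (a b : Int) (f : Int → Int) :
    ((PySem.List.pyRange a b 1).map f).sum = ∑ k ∈ Finset.range (b - a).toNat, f (a + (k : Int)) := by
  rw [PySem.List.pyRange_one, List.map_map]
  exact sum_map_range _ _

theorem sum_extend (N K : Nat) (hKN : K ≤ N) (f : Nat → Int)
    (hz : ∀ k, K ≤ k → k < N → f k = 0) :
    ∑ k ∈ Finset.range K, f k = ∑ k ∈ Finset.range N, f k := by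
  apply Finset.sum_subset
  · intro x hx
    rw [Finset.mem_range] at *
    omega
  · intro k hk hk2
    exact hz k (by simpa using hk2) (by simpa using hk)

theorem sum_map_filter_general (l : List Int) (b : Int → Bool) (f : Int → Int) :
    ((l.filter b).map f).sum = (l.map (fun x => if b x then f x else 0)).sum := by
  induction l with
  | nil => rfl
  | cons a l ih => by_cases h : b a <;> simp [h, ih]

theorem pyGetD_oob {α : Type} (xs : List α) (i : Int) (d : α) (h : (xs.length : Int) ≤ i) :
    PySem.List.pyGetD xs i d = d := by
  apply PySem.List.pyGetD_of_none
  rw [PySem.List.pyGet?_eq_none_iff]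
  unfold PySem.Raise.InRange
  omega

theorem colsOf_eq (row : List Int) :
    colsOf row = (PySem.List.pyRange 0 (row.length : Int) 1).filter
      (fun c => PySem.List.pyGetD row c 0 == 1) := by
  unfold colsOf
  rw [PySem.List.enumerate_eq_map_pyRange row 0]
  rw [PySem.List.foldl_append_if]
  rw [List.filter_map, List.map_map]
  simp only [PySem.List.len_eq, Function.comp_def, List.map_id_fun', List.nil_append]
  rfl

theorem mem_colsOf (row : List Int) (c : Int) :
    c ∈ colsOf row ↔ 0 ≤ c ∧ c < (row.length : Int) ∧ PySem.List.pyGetD row c 0 = 1 := by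
  rw [colsOf_eq]
  simp [List.mem_filter, PySem.List.mem_pyRange_one, and_assoc]

-- pyGetD on a take agrees with pyGetD on the list, below the take's length

theorem pyGetD_take (row : List Int) (mN : Nat) (c : Int)
    (h0 : 0 ≤ c) (h1 : c < ((List.take mN row).length : Int)) :
    PySem.List.pyGetD (List.take mN row) c 0 = PySem.List.pyGetD row c 0 := by
  rw [PySem.List.pyGetD_eq_getElem _ _ h0 h1,
    PySem.List.pyGetD_eq_getElem _ _ h0 (by simp at h1 ⊢; omega)]
  exact List.getElem_take

theorem mem_colsOf_take (row : List Int) (mN : Nat) (c : Int) :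
    c ∈ colsOf (List.take mN row) ↔
      0 ≤ c ∧ c < (mN : Int) ∧ PySem.List.pyGetD row c 0 = 1 := by
  rw [mem_colsOf]
  constructor
  · rintro ⟨h0, h1, h2⟩
    rw [pyGetD_take row mN c h0 h1] at h2
    refine ⟨h0, by simp at h1; omega, h2⟩
  · rintro ⟨h0, h1, h2⟩
    have hlt : c < ((List.take mN row).length : Int) := by
      by_cases hr : c < (row.length : Int)
      · simp; omega
      · rw [pyGetD_oob row c 0 (by omega)] at h2
        omega
    exact ⟨h0, hlt, by rw [pyGetD_take row mN c h0 hlt]; exact h2⟩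

theorem pair_sum (s : List (List Int)) (i j : Int)
    (hij : i < j) (hj : j < (s.length : Int)) :
    ((PySem.List.pyGetD (s.map (fun row => colsOf
          (PySem.List.slice row none (some ((s.headI.length : Int)))))) i []).filter
        (fun c => c ∈ PySem.List.pyGetD (s.map (fun row => colsOf
          (PySem.List.slice row none (some ((s.headI.length : Int)))))) j [])).foldl
      (fun a c => if (c + (j - i)) ∈ (PySem.List.pyGetD (s.map (fun row => colsOf
          (PySem.List.slice row none (some ((s.headI.length : Int)))))) i []).filter
        (fun c => c ∈ PySem.List.pyGetD (s.map (fun row => colsOf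
          (PySem.List.slice row none (some ((s.headI.length : Int)))))) j []) then a + 1 else a) 0
    = ∑ c ∈ Finset.range s.headI.length, ind s i c (j - i) := by
  have hslice : (fun row : List Int => colsOf (PySem.List.slice row none (some ((s.headI.length : Int)))))
      = (fun row : List Int => colsOf (List.take s.headI.length row)) := by
    funext row
    rw [PySem.List.slice_to row (by omega)]
    simp
  rw [hslice]
  have hmapi : PySem.List.pyGetD (s.map (fun row => colsOf (List.take s.headI.length row))) i []
      = colsOf (List.take s.headI.length (PySem.List.pyGetD s i [])) := by
    have := PySem.List.pyGetD_map (fun row => colsOf (List.take s.headI.length row)) s i []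
    simpa using this
  have hmapj : PySem.List.pyGetD (s.map (fun row => colsOf (List.take s.headI.length row))) j []
      = colsOf (List.take s.headI.length (PySem.List.pyGetD s j [])) := by
    have := PySem.List.pyGetD_map (fun row => colsOf (List.take s.headI.length row)) s j []
    simpa using this
  have hgi : ∀ z : Int, PySem.List.pyGetD (PySem.List.pyGetD s i []) z 0 = g2 s i z := fun _ => rfl
  have hgj : ∀ z : Int, PySem.List.pyGetD (PySem.List.pyGetD s j []) z 0 = g2 s j z := fun _ => rfl
  have hinter : (PySem.List.pyGetD (s.map (fun row => colsOf (List.take s.headI.length row))) i []).filter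
      (fun c => c ∈ PySem.List.pyGetD (s.map (fun row => colsOf (List.take s.headI.length row))) j [])
      = (PySem.List.pyRange 0 (((List.take s.headI.length (PySem.List.pyGetD s i [])).length : Int)) 1).filter
        (fun a => decide (a ∈ PySem.List.pyGetD (s.map (fun row => colsOf (List.take s.headI.length row))) j []) &&
          (PySem.List.pyGetD (List.take s.headI.length (PySem.List.pyGetD s i [])) a 0 == 1)) := by
    conv_lhs => rw [hmapi, colsOf_eq (List.take s.headI.length (PySem.List.pyGetD s i []))]
    rw [List.filter_filter]
  rw [hinter]
  have hmemJ : ∀ z : Int,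
      (z ∈ PySem.List.pyGetD (s.map (fun row => colsOf (List.take s.headI.length row))) j []) ↔
      (0 ≤ z ∧ z < (s.headI.length : Int) ∧ g2 s j z = 1) := by
    intro z
    rw [hmapj, mem_colsOf_take, hgj]
  have hmem : ∀ z : Int,
      (z ∈ (PySem.List.pyRange 0 (((List.take s.headI.length (PySem.List.pyGetD s i [])).length : Int)) 1).filter
        (fun a => decide (a ∈ PySem.List.pyGetD (s.map (fun row => colsOf (List.take s.headI.length row))) j []) &&
          (PySem.List.pyGetD (List.take s.headI.length (PySem.List.pyGetD s i [])) a 0 == 1))) ↔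
      (0 ≤ z ∧ z < (s.headI.length : Int) ∧ g2 s i z = 1 ∧ g2 s j z = 1) := by
    intro z
    rw [List.mem_filter, PySem.List.mem_pyRange_one]
    simp only [Bool.and_eq_true, decide_eq_true_eq, beq_iff_eq]
    rw [hmemJ]
    constructor
    · rintro ⟨⟨h1, h2⟩, ⟨-, h5, h4⟩, h3⟩
      rw [pyGetD_take _ _ _ h1 h2, hgi] at h3
      exact ⟨h1, h5, h3, h4⟩
    · rintro ⟨h1, h2, h3, h4⟩
      have hmm := (mem_colsOf_take (PySem.List.pyGetD s i []) s.headI.length z).mpr ⟨h1, h2, by rw [hgi]; exact h3⟩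
      rw [mem_colsOf] at hmm
      exact ⟨⟨hmm.1, hmm.2.1⟩, ⟨h1, h2, h4⟩, hmm.2.2⟩
  rw [foldl_body_add _ _
    (fun c => if (c + (j - i)) ∈ (PySem.List.pyRange 0 (((List.take s.headI.length (PySem.List.pyGetD s i [])).length : Int)) 1).filter
        (fun a => decide (a ∈ PySem.List.pyGetD (s.map (fun row => colsOf (List.take s.headI.length row))) j []) &&
          (PySem.List.pyGetD (List.take s.headI.length (PySem.List.pyGetD s i [])) a 0 == 1)) then (1 : Int) else 0)
    (fun t c _ => by beta_reduce; split_ifs <;> ring) 0]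
  rw [zero_add, sum_map_filter_general, sum_map_pyRange]
  simp only [Int.sub_zero, Int.toNat_natCast, zero_add]
  rw [sum_extend s.headI.length (List.take s.headI.length (PySem.List.pyGetD s i [])).length
    (by simp) _ ?hz]
  case hz =>
    intro k hk1 hk2
    beta_reduce
    rw [if_neg]
    intro hQ
    rw [Bool.and_eq_true, beq_iff_eq] at hQ
    rw [pyGetD_oob (List.take s.headI.length (PySem.List.pyGetD s i [])) (k : Int) 0 (by omega)] at hQ
    exact absurd hQ.2 (by omega)
  apply Finset.sum_congr rfl
  intro k hk
  rw [Finset.mem_range] at hk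
  have hQiff : ((decide ((k : Int) ∈ PySem.List.pyGetD (s.map (fun row => colsOf (List.take s.headI.length row))) j []) &&
      (PySem.List.pyGetD (List.take s.headI.length (PySem.List.pyGetD s i [])) (k : Int) 0 == 1)) = true) ↔
      (g2 s i k = 1 ∧ g2 s j k = 1) := by
    rw [Bool.and_eq_true, beq_iff_eq, decide_eq_true_eq, hmemJ]
    constructor
    · rintro ⟨⟨-, -, h4⟩, h3⟩
      by_cases hL : (k : Int) < ((List.take s.headI.length (PySem.List.pyGetD s i [])).length : Int)
      · rw [pyGetD_take _ _ _ (by omega) hL, hgi] at h3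
        exact ⟨h3, h4⟩
      · rw [pyGetD_oob _ _ _ (by omega)] at h3
        omega
    · rintro ⟨h3, h4⟩
      refine ⟨⟨by omega, by omega, h4⟩, ?_⟩
      have hmm := (mem_colsOf_take (PySem.List.pyGetD s i []) s.headI.length (k : Int)).mpr
        ⟨by omega, by omega, by rw [hgi]; exact h3⟩
      rw [mem_colsOf] at hmm
      rw [pyGetD_take _ _ _ (by omega) hmm.2.1]
      rw [hgi]
      exact h3
  unfold ind
  by_cases hQ : (g2 s i k = 1 ∧ g2 s j k = 1)
  · rw [if_pos (hQiff.mpr hQ)]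
    have hje : i + (j - i) = j := by ring
    by_cases hM : ((k : Int) + (j - i)) ∈ (PySem.List.pyRange 0 (((List.take s.headI.length (PySem.List.pyGetD s i [])).length : Int)) 1).filter
        (fun a => decide (a ∈ PySem.List.pyGetD (s.map (fun row => colsOf (List.take s.headI.length row))) j []) &&
          (PySem.List.pyGetD (List.take s.headI.length (PySem.List.pyGetD s i [])) a 0 == 1))
    · obtain ⟨-, hb, h5, h6⟩ := (hmem _).mp hM
      rw [if_pos hM, if_pos]
      rw [hje]
      exact ⟨by omega, by omega, hQ.1, hQ.2, h5, h6⟩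
    · rw [if_neg hM, if_neg]
      intro hcc
      rw [hje] at hcc
      obtain ⟨-, hb, -, -, h5, h6⟩ := hcc
      exact hM ((hmem _).mpr ⟨by omega, hb, h5, h6⟩)
  · rw [if_neg (fun hc => hQ (hQiff.mp hc)), if_neg]
    intro hcc
    obtain ⟨-, -, h3, h4, -⟩ := hcc
    rw [show i + (j - i) = j from by ring] at h4
    exact hQ ⟨h3, h4⟩

theorem A_eq_S (s : List (List Int)) (hne : s ≠ []) : fs s = S s := by
  have hm0 : (PySem.List.pyGet? s 0).getD [] = s.headI := by
    cases s with
    | nil => exact absurd rfl hne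
    | cons a l => simp
  unfold fs
  simp only [hm0]
  rw [foldl_body_add _ _
    (fun x => ∑ y ∈ Finset.range s.headI.length, ∑ d ∈ Finset.range s.length,
      ind s x (y : Int) ((d : Int) + 1)) ?hX 0]
  case hX =>
    intro t x hxmem
    rw [PySem.List.mem_pyRange_one] at hxmem
    obtain ⟨hx0, hx1⟩ := hxmem
    rw [foldl_body_add _ _
      (fun y => ∑ d ∈ Finset.range s.length, ind s x y ((d : Int) + 1)) ?hY t]
    case hY =>
      intro t y hymem
      rw [PySem.List.mem_pyRange_one] at hymem
      obtain ⟨hy0, hy1⟩ := hymem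
      by_cases hg : g2 s x y = 1
      · rw [if_pos (by simpa using hg)]
        rw [foldl_body_add _ _
          (fun d => if g2 s (x + d) y = 1 ∧ g2 s x (y + d) = 1 ∧ g2 s (x + d) (y + d) = 1
            then (1 : Int) else 0) ?hD t]
        case hD =>
          intro t d _
          by_cases hc : g2 s (x + d) y = 1 ∧ g2 s x (y + d) = 1 ∧ g2 s (x + d) (y + d) = 1
          · simp [hc.1, hc.2.1, hc.2.2]
          · have hb : ¬(g2 s (x + d) y == 1 && (g2 s x (y + d) == 1 && g2 s (x + d) (y + d) == 1)) = true := by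
              simp only [Bool.and_eq_true, beq_iff_eq]
              tauto
            simp [hb, hc]
        show t + _ = t + ∑ d ∈ Finset.range s.length, ind s x y ((d : Int) + 1)
        congr 1
        rw [sum_map_pyRange]
        have hmm : min ((s.length : Int) - 1 - x) ((s.headI.length : Int) - 1 - y) + 1 - 1
            = min ((s.length : Int) - 1 - x) ((s.headI.length : Int) - 1 - y) := by ring
        rw [hmm]
        rw [Finset.sum_congr rfl (g := fun k : Nat => ind s x y ((k : Int) + 1)) ?term]
        · apply sum_extend
          · omega
          · intro k hk1 hk2
            have hK : min ((s.length : Int) - 1 - x) ((s.headI.length : Int) - 1 - y) ≤ (k : Int) := by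
              omega
            unfold ind
            rw [if_neg]
            intro hcc
            obtain ⟨hb1, hb2, -⟩ := hcc
            rcases min_le_iff.mp hK with hh | hh <;> omega
        case term =>
          intro k hk
          rw [Finset.mem_range] at hk
          have hkK : (k : Int) < min ((s.length : Int) - 1 - x) ((s.headI.length : Int) - 1 - y) := by
            omega
          rw [show (1 : Int) + (k : Int) = (k : Int) + 1 from by ring]
          unfold ind
          beta_reduce
          split_ifs with h1 h2 h2
          · rfl
          · exact absurd ⟨by omega, by omega, hg, h1.1, h1.2.1, h1.2.2⟩ h2
          · exact absurd ⟨h2.2.2.2.1, h2.2.2.2.2.1, h2.2.2.2.2.2⟩ h1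
          · rfl
      · rw [if_neg (by simpa using hg)]
        have hz : (∑ d ∈ Finset.range s.length, ind s x y ((d : Int) + 1)) = 0 :=
          Finset.sum_eq_zero (fun d _ => by
            unfold ind
            rw [if_neg]
            rintro ⟨-, -, h1, -⟩
            exact hg h1)
        show t = t + ∑ d ∈ Finset.range s.length, ind s x y ((d : Int) + 1)
        rw [hz, add_zero]
    show t + _ = t + ∑ y ∈ Finset.range s.headI.length, ∑ d ∈ Finset.range s.length,
      ind s x (y : Int) ((d : Int) + 1)
    congr 1
    rw [sum_map_pyRange]
    rw [Finset.sum_congr rfl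
      (g := fun k : Nat => ∑ d ∈ Finset.range s.length, ind s x (k : Int) ((d : Int) + 1))
      (fun k _ => by simp)]
    apply sum_extend
    · omega
    · intro k hk1 hk2
      exact Finset.sum_eq_zero (fun d _ => by
        unfold ind
        rw [if_neg]
        rintro ⟨-, hb, -⟩
        omega)
  show 0 + _ = S s
  rw [zero_add, sum_map_pyRange]
  rw [Finset.sum_congr rfl
    (g := fun k : Nat => ∑ y ∈ Finset.range s.headI.length, ∑ d ∈ Finset.range s.length,
      ind s (k : Int) (y : Int) ((d : Int) + 1))
    (fun k _ => by simp)]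
  unfold S
  apply sum_extend
  · omega
  · intro k hk1 hk2
    exact Finset.sum_eq_zero (fun y _ => Finset.sum_eq_zero (fun d _ => by
      unfold ind
      rw [if_neg]
      rintro ⟨hb, -⟩
      omega))

theorem B_eq_S (s : List (List Int)) (hne : s ≠ []) : fs_alt s = S s := by
  have hm0 : (PySem.List.pyGet? s 0).getD [] = s.headI := by
    cases s with
    | nil => exact absurd rfl hne
    | cons a l => simp
  unfold fs_alt
  simp only [hm0, List.length_map]
  rw [foldl_body_add _ _
    (fun i => ∑ d ∈ Finset.range s.length, ∑ c ∈ Finset.range s.headI.length,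
      ind s i (c : Int) ((d : Int) + 1)) ?hI 0]
  case hI =>
    intro t i himem
    rw [PySem.List.mem_pyRange_one] at himem
    obtain ⟨hi0, hi1⟩ := himem
    rw [foldl_body_add _ _
      (fun j => ∑ c ∈ Finset.range s.headI.length, ind s i (c : Int) (j - i)) ?hJ t]
    case hJ =>
      intro t j hjmem
      rw [PySem.List.mem_pyRange_one] at hjmem
      obtain ⟨hj0, hj1⟩ := hjmem
      show t + _ = t + _
      congr 1
      exact pair_sum s i j (by omega) hj1
    show t + _ = t + ∑ d ∈ Finset.range s.length, ∑ c ∈ Finset.range s.headI.length,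
      ind s i (c : Int) ((d : Int) + 1)
    congr 1
    rw [sum_map_pyRange]
    rw [Finset.sum_congr rfl
      (g := fun k : Nat => ∑ c ∈ Finset.range s.headI.length, ind s i (c : Int) ((k : Int) + 1))
      (fun k _ => by
        apply Finset.sum_congr rfl
        intro c _
        have : i + 1 + (k : Int) - i = (k : Int) + 1 := by ring
        rw [this])]
    apply sum_extend
    · omega
    · intro k hk1 hk2
      exact Finset.sum_eq_zero (fun c _ => by
        unfold ind
        rw [if_neg]
        rintro ⟨hb, -⟩
        omega)
  show 0 + _ = S s
  rw [zero_add, sum_map_pyRange]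
  unfold S
  simp only [Int.sub_zero, Int.toNat_natCast]
  apply Finset.sum_congr rfl
  intro i _
  rw [Finset.sum_comm]
  simp

-- ===== VERDICT (by name: the statement is the Claim_ definition above) =====
theorem fs_spec : Claim_equal_fs := by
  intro s _ hpre
  unfold Spec_fs
  rw [A_eq_S s hpre.1, B_eq_S s hpre.1]
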